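-- pv_equiv track=rewrite | github.com/codebusted/codeforces-python | 705A.py | hulk
-- ===== SOURCE A (Python) =====
-- def hulk(n):
--     feeling = "I hate"
--     while n != 0:
--         n = n - 1
--         if n != 0:
--             feeling = feeling + " that I love"
--             n = n - 1
--         if n != 0:
--             feeling = feeling + " that I hate"
--     feeling = feeling + " it"
--     return feeling
-- ===== SOURCE B (Python) =====
-- def hulk(n):
--     count = max(n, 1)
--     feelings = ["I hate" if i % 2 == 0 else "I love" for i in range(count)]
--     return " that ".join(feelings) + " it"
-- ===== Notes on version B (the rewrite author's own statement) =====
-- stated objective: simpler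
-- what changed: replaces A's while-loop that decrements n by 1 or 2 per iteration while appending suffixes to a running string with a build-then-join: a comprehension producing the alternating feeling strings by index parity over range(max(n,1)), joined with ' that ' and suffixed with ' it'.
import Mathlib
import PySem

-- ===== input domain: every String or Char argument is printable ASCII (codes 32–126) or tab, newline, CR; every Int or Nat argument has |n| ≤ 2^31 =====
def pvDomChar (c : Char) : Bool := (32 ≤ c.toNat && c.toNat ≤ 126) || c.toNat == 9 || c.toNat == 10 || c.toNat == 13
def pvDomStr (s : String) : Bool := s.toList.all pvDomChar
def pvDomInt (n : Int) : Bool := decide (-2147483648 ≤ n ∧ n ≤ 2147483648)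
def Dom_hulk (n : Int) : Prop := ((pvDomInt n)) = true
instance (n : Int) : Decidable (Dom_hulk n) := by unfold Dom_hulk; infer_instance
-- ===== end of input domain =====

-- B replaces A's running-string append loop with a build-then-join over an index-parity list (objective: simpler).

-- ===== PORT A =====
-- Python's while loop; the 'n ≤ 0' test merely makes the recursion total: under Pre_hulk
-- (0 ≤ n) it coincides with Python's 'n != 0' guard (for n < 0 the Python loops forever,
-- which Pre_hulk excludes).  The two sequential 'if n != 0' bodies become nested branches
-- on the decremented counter, appending the same pieces in the same order.
def hulkLoop (n : Int) (feeling : String) : String :=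
  if n ≤ 0 then feeling
  else if n - 1 ≠ 0 then
    (if n - 2 ≠ 0 then hulkLoop (n - 2) (feeling ++ " that I love" ++ " that I hate")
     else hulkLoop (n - 2) (feeling ++ " that I love"))
  else hulkLoop (n - 1) feeling
termination_by n.toNat
decreasing_by all_goals omega

def hulk (n : Int) : String := hulkLoop n "I hate" ++ " it"

-- ===== PORT B =====
-- element of the comprehension: "I hate" for even i, "I love" for odd i
def feelF (i : Int) : String := if PySem.Int.mod i 2 == 0 then "I hate" else "I love"

def hulk_alt (n : Int) : String :=
  let count := max n 1
  let feelings := (PySem.List.pyRange 0 count 1).map feelF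
  PySem.Str.join " that " feelings ++ " it"

-- ===== PRECONDITION & SPEC =====
-- Pre_hulk excludes n < 0, on which the Python A never returns (its while loop runs forever)
def Pre_hulk (n : Int) : Prop := 0 ≤ n
instance (n : Int) : Decidable (Pre_hulk n) := by unfold Pre_hulk; infer_instance
def pvWitness_hulk : Int := (3)

def Spec_hulk (n : Int) (out : String) : Prop := out = hulk_alt n
instance (n : Int) (out : String) : Decidable (Spec_hulk n out) := by unfold Spec_hulk; infer_instance

-- ===== CLAIM (what is proved, stated in full; the proofs are below) =====
def Claim_equal_hulk : Prop := ∀ (n : Int), Dom_hulk n → Pre_hulk n → Spec_hulk n (hulk n)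

-- ===== LEMMAS AND PROOFS =====

-- the characters the loop appends after the initial "I hate"
def sfx : Nat → List Char
  | 0 => []
  | 1 => []
  | 2 => " that I love".toList
  | m + 3 => " that I love".toList ++ " that I hate".toList ++ sfx (m + 1)

theorem loop_sfx : ∀ (m : Nat) (s : String), (hulkLoop (m : Int) s).toList = s.toList ++ sfx m
  | 0, s => by
      rw [hulkLoop]
      simp [sfx]
  | 1, s => by
      rw [hulkLoop]
      have h1 : ¬ (((1 : Nat) : Int) ≤ 0) := by norm_num
      have h2 : ¬ (((1 : Nat) : Int) - 1 ≠ 0) := by norm_num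
      rw [if_neg h1, if_neg h2]
      have h4 : ((1 : Nat) : Int) - 1 = ((0 : Nat) : Int) := by norm_num
      rw [h4, loop_sfx 0]
      simp [sfx]
  | 2, s => by
      rw [hulkLoop]
      have h1 : ¬ (((2 : Nat) : Int) ≤ 0) := by norm_num
      have h2 : ((2 : Nat) : Int) - 1 ≠ 0 := by norm_num
      have h3 : ¬ (((2 : Nat) : Int) - 2 ≠ 0) := by norm_num
      rw [if_neg h1, if_pos h2, if_neg h3]
      have h4 : ((2 : Nat) : Int) - 2 = ((0 : Nat) : Int) := by norm_num
      rw [h4, loop_sfx 0]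
      simp [sfx]
  | m + 3, s => by
      rw [hulkLoop]
      have h1 : ¬ (((m + 3 : Nat) : Int) ≤ 0) := by push_cast; omega
      have h2 : ((m + 3 : Nat) : Int) - 1 ≠ 0 := by push_cast; omega
      have h3 : ((m + 3 : Nat) : Int) - 2 ≠ 0 := by push_cast; omega
      rw [if_neg h1, if_pos h2, if_pos h3]
      have h4 : ((m + 3 : Nat) : Int) - 2 = ((m + 1 : Nat) : Int) := by push_cast; ring
      rw [h4, loop_sfx (m + 1)]
      simp [sfx]

-- the comprehension element at a Nat index
def feelN (k : Nat) : String := feelF (Int.ofNat k)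

theorem feel_shift (k : Nat) : feelN (k + 2) = feelN k := by
  unfold feelN feelF
  have h : PySem.Int.mod (Int.ofNat (k + 2)) 2 = PySem.Int.mod (Int.ofNat k) 2 := by
    simp only [PySem.Int.mod]
    have hcast : (Int.ofNat (k + 2)) = Int.ofNat k + 2 * 1 := by
      show ((k + 2 : Nat) : Int) = ((k : Nat) : Int) + 2 * 1
      push_cast
      ring
    rw [hcast]
    rw [Int.add_mul_fmod_self_left]
  rw [h]

theorem map_feel_pyRange (m : Nat) :
    (PySem.List.pyRange 0 (m : Int) 1).map feelF = (List.range m).map feelN := by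
  rw [PySem.List.pyRange_one, List.map_map]
  simp only [Int.sub_zero, Int.toNat_natCast]
  refine List.map_congr_left (fun k _ => ?_)
  show feelF (0 + (k : Int)) = feelN k
  rw [zero_add]
  rfl

theorem range_feel (m : Nat) :
    (List.range (m + 3)).map feelN = "I hate" :: "I love" :: (List.range (m + 1)).map feelN := by
  rw [List.range_succ_eq_map, List.range_succ_eq_map]
  simp only [List.map_cons, List.map_map]
  refine congrArg₂ List.cons (by decide) (congrArg₂ List.cons (by decide) ?_)
  refine List.map_congr_left (fun k _ => ?_)
  show feelN (k + 1 + 1) = feelN k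
  rw [show k + 1 + 1 = k + 2 from rfl, feel_shift]

theorem join_sfx : ∀ (m : Nat), 1 ≤ m →
    (PySem.Str.join " that " ((List.range m).map feelN)).toList = "I hate".toList ++ sfx m
  | 0, h => by omega
  | 1, _ => by decide
  | 2, _ => by decide
  | m + 3, _ => by
      have IH := join_sfx (m + 1) (by omega)
      rw [PySem.Str.toList_join] at IH ⊢
      rw [range_feel]
      obtain ⟨x, xs, hx⟩ : ∃ x xs,
          List.map String.toList ((List.range (m + 1)).map feelN) = x :: xs := by
        rw [List.range_succ_eq_map]
        exact ⟨_, _, rfl⟩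
      simp only [List.map_cons]
      rw [hx, PySem.Chars.join_cons_cons, PySem.Chars.join_cons_cons, ← hx, IH]
      simp only [sfx]
      simp only [← List.append_assoc]
      exact congrArg (· ++ sfx (m + 1)) (by decide)

-- ===== VERDICT (by name: the statement is the Claim_ definition above) =====
theorem hulk_spec : Claim_equal_hulk := by
  intro n _ hpre
  unfold Spec_hulk hulk hulk_alt
  obtain ⟨m, rfl⟩ : ∃ m : Nat, n = (m : Int) := ⟨n.toNat, (Int.toNat_of_nonneg hpre).symm⟩
  rcases Nat.eq_zero_or_pos m with h0 | h1
  · subst h0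
    apply String.toList_inj.mp
    rw [String.toList_append, String.toList_append]
    rw [loop_sfx 0]
    have hmax : max (((0 : Nat)) : Int) 1 = ((1 : Nat) : Int) := by norm_num
    show _ = ((PySem.Str.join " that " ((PySem.List.pyRange 0 (max (((0 : Nat)) : Int) 1) 1).map feelF)).toList ++ " it".toList)
    rw [hmax, map_feel_pyRange 1, join_sfx 1 (le_refl 1)]
    simp [sfx]
  · apply String.toList_inj.mp
    rw [String.toList_append, String.toList_append]
    rw [loop_sfx m]
    have hmax : max ((m : Int)) 1 = (m : Int) := by omega
    show _ = ((PySem.Str.join " that " ((PySem.List.pyRange 0 (max ((m : Int)) 1) 1).map feelF)).toList ++ " it".toList)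
    rw [hmax, map_feel_pyRange m, join_sfx m h1]
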